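-- pv_equiv track=rewrite | github.com/bubpen/codekata | 프로그래머스/2/138476. 귤 고르기/귤 고르기.py | solution
-- ===== SOURCE A (Python) =====
-- def solution(k, tangerine):
--     cnt ={}
--     for i in tangerine:
--         cnt[i] = cnt.get(i, 0) + 1
--     diff = max(cnt.values())
--     keys = []
--     while k > 0:
--         for key, value in cnt.items():
--             if value == diff:
--                 keys.append(key)
--                 k -= diff
--             if k <= 0:
--                 break
--         diff -= 1
--     return len(keys)
-- ===== SOURCE B (Python) =====
-- def solution(k, tangerine):
--     cnt = {}
--     for t in tangerine:
--         cnt[t] = cnt.get(t, 0) + 1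
--     total = 0
--     types = 0
--     for c in sorted(cnt.values(), reverse=True):
--         if total >= k:
--             break
--         total += c
--         types += 1
--     return types
-- ===== Notes on version B (the rewrite author's own statement) =====
-- stated objective: alternative
-- what changed: A re-scans the whole counter dict once per candidate count value, counting down from the maximum count; B sorts the counts descending once and accumulates them in a single pass until k is reached.
import Mathlib
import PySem

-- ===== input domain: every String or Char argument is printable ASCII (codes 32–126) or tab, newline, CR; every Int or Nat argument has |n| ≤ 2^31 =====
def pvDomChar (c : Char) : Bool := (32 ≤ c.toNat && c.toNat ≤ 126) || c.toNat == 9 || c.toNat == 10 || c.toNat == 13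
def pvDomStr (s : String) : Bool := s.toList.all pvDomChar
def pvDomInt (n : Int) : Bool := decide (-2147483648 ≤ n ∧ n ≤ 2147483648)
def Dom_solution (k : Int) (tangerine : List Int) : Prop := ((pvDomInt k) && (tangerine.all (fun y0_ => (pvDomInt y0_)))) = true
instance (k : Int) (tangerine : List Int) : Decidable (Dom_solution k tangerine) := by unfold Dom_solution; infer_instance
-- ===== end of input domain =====

-- B replaces A's repeated full scans of the counter (one pass per candidate count value, from the
-- maximum downwards) by a single descending sort of the counts followed by one accumulation pass.

-- ===== PORT A =====
-- inner 'for key, value in cnt.items()' loop: on a match append the key and subtract diff;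
-- after every item Python checks 'if k <= 0: break'.
def solutionInner (k : Int) (diff : Int) (items : List (Int × Int)) (keys : List Int) :
    Int × List Int :=
  match items with
  | [] => (k, keys)
  | (key, value) :: rest =>
    let s := if value == diff then (k - diff, keys ++ [key]) else (k, keys)
    if s.1 ≤ 0 then s else solutionInner s.1 diff rest s.2

-- the 'while k > 0' loop; diff starts at max(cnt.values()) and decreases by 1 each pass.
-- fuel = current diff as a Nat: when fuel hits 0 with k still > 0, Python would loop forever
-- (diff ≤ 0 never matches a count); that situation is excluded by Pre_solution.
def solutionOuter (fuel : Nat) (k : Int) (items : List (Int × Int)) (keys : List Int) : List Int :=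
  if k ≤ 0 then keys
  else
    match fuel with
    | 0 => keys
    | d + 1 =>
      let s := solutionInner k ((d : Int) + 1) items keys
      solutionOuter d s.1 items s.2

def solution (k : Int) (tangerine : List Int) : Int :=
  let cnt := tangerine.foldl (fun d i => d.insert i (d.getD i 0 + 1)) (PySem.Dict.empty : PySem.Dict Int Int)
  match PySem.List.max? cnt.values (fun v => v) with
  | none => 0  -- Python raises ValueError on max(()) here; excluded by Pre_solution
  | some diff => ((solutionOuter diff.toNat k cnt.items []).length : Int)

-- ===== PORT B =====
-- 'for c in sorted(cnt.values(), reverse=True): if total >= k: break; total += c; types += 1'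
def solutionAltLoop (k : Int) (total : Int) (types : Int) (cs : List Int) : Int :=
  match cs with
  | [] => types
  | c :: rest => if total ≥ k then types else solutionAltLoop k (total + c) (types + 1) rest

def solution_alt (k : Int) (tangerine : List Int) : Int :=
  let cnt := tangerine.foldl (fun d i => d.insert i (d.getD i 0 + 1)) (PySem.Dict.empty : PySem.Dict Int Int)
  solutionAltLoop k 0 0 (PySem.List.sorted cnt.values (fun v => v) true)

-- ===== PRECONDITION & SPEC =====
-- Pre_ excludes exactly the inputs on which Python A does not return: the empty list
-- (max(()) raises ValueError) and k greater than len(tangerine) (the while loop never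
-- terminates because the counts can no longer reduce k to 0).
def Pre_solution (k : Int) (tangerine : List Int) : Prop :=
  tangerine ≠ [] ∧ k ≤ (tangerine.length : Int)
instance (k : Int) (tangerine : List Int) : Decidable (Pre_solution k tangerine) := by
  unfold Pre_solution; infer_instance
def pvWitness_solution : Int × List Int := (2, [1, 1, 2])

def Spec_solution (k : Int) (tangerine : List Int) (out : Int) : Prop := out = solution_alt k tangerine
instance (k : Int) (tangerine : List Int) (out : Int) : Decidable (Spec_solution k tangerine out) := by unfold Spec_solution; infer_instance

-- ===== CLAIM (what is proved, stated in full; the proofs are below) =====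
def Claim_equal_solution : Prop := ∀ (k : Int) (tangerine : List Int), Dom_solution k tangerine → Pre_solution k tangerine → Spec_solution k tangerine (solution k tangerine)

-- ===== LEMMAS AND PROOFS =====

-- run the whole selection as one pass over a list of (key, weight) pairs
def runAll (k : Int) (keys : List Int) (L : List (Int × Int)) : Int × List Int :=
  match L with
  | [] => (k, keys)
  | (key, d) :: rest => if k ≤ 0 then (k, keys) else runAll (k - d) (keys ++ [key]) rest

-- the items with count = fuel, fuel-1, …, 1, concatenated
def grps (fuel : Nat) (items : List (Int × Int)) : List (Int × Int) :=
  match fuel with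
  | 0 => []
  | d + 1 => items.filter (fun p => p.2 == ((d : Int) + 1)) ++ grps d items

-- number of elements taken greedily until k is exhausted
def gcount (k : Int) (cs : List Int) : Int :=
  match cs with
  | [] => 0
  | c :: rest => if k ≤ 0 then 0 else 1 + gcount (k - c) rest

theorem runAll_nonpos (k : Int) (keys : List Int) (L : List (Int × Int)) (h : k ≤ 0) :
    runAll k keys L = (k, keys) := by
  cases L with
  | nil => rfl
  | cons p rest => cases p; simp [runAll, h]

theorem runAll_append (k : Int) (keys : List Int) (L1 L2 : List (Int × Int)) :
    runAll k keys (L1 ++ L2) = runAll (runAll k keys L1).1 (runAll k keys L1).2 L2 := by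
  induction L1 generalizing k keys with
  | nil => simp [runAll]
  | cons p rest ih =>
    cases p with
    | mk key d =>
      by_cases h : k ≤ 0
      · simp [runAll, h, runAll_nonpos _ _ _ h]
      · simp [runAll, h, ih]

theorem inner_eq (k diff : Int) (items : List (Int × Int)) (keys : List Int) (hk : 0 < k) :
    solutionInner k diff items keys = runAll k keys (items.filter (fun p => p.2 == diff)) := by
  induction items generalizing k keys with
  | nil => simp [solutionInner, runAll]
  | cons p rest ih =>
    cases p with
    | mk key value =>
      by_cases hv : value == diff
      · have hd : value = diff := by simpa using hv
        subst hd
        by_cases hb : k - value ≤ 0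
        · simp [solutionInner, hb, List.filter, runAll, not_le.mpr hk,
            runAll_nonpos _ _ _ hb]
        · simp only [solutionInner, beq_self_eq_true, if_true]
          simp only [List.filter, beq_self_eq_true]
          simp only [hb, if_false, runAll, not_le.mpr hk]
          exact ih _ _ (by omega)
      · simp only [solutionInner, hv]
        simp only [List.filter, hv]
        simpa [not_le.mpr hk] using ih _ _ hk

theorem outer_eq (fuel : Nat) (k : Int) (items : List (Int × Int)) (keys : List Int) :
    solutionOuter fuel k items keys = (runAll k keys (grps fuel items)).2 := by
  induction fuel generalizing k keys with
  | zero =>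
    by_cases h : k ≤ 0 <;> simp [solutionOuter, grps, runAll, h]
  | succ d ih =>
    by_cases h : k ≤ 0
    · simp [solutionOuter, h, grps, runAll_nonpos _ _ _ h]
    · simp only [solutionOuter, h, if_false, grps, runAll_append]
      rw [inner_eq _ _ _ _ (by omega)]
      exact ih _ _

theorem runAll_len (k : Int) (keys : List Int) (L : List (Int × Int)) :
    (((runAll k keys L).2.length : Int)) = (keys.length : Int) + gcount k (L.map Prod.snd) := by
  induction L generalizing k keys with
  | nil => simp [runAll, gcount]
  | cons p rest ih =>
    cases p with
    | mk key d =>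
      by_cases h : k ≤ 0
      · simp [runAll, h, gcount]
      · simp only [runAll, h, if_false, List.map, gcount]
        rw [ih]
        simp
        omega

theorem altLoop_eq (k : Int) (cs : List Int) (total types : Int) :
    solutionAltLoop k total types cs = types + gcount (k - total) cs := by
  induction cs generalizing total types with
  | nil => simp [solutionAltLoop, gcount]
  | cons c rest ih =>
    by_cases h : total ≥ k
    · simp [solutionAltLoop, h, gcount, show k - total ≤ 0 by omega]
    · have h' : ¬ (k - total ≤ 0) := by omega
      simp only [solutionAltLoop, h, if_false, gcount, h', if_false, ih]
      have : k - (total + c) = k - total - c := by ring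
      rw [this]
      ring

theorem map_snd_filter (c : Int) (items : List (Int × Int)) :
    (items.filter (fun p => p.2 == c)).map Prod.snd
      = (items.map Prod.snd).filter (fun v => v == c) := by
  induction items with
  | nil => rfl
  | cons p rest ih =>
    by_cases h : p.2 == c <;> simp [List.filter, h, ih]

-- the value-level groups
def vgrps (fuel : Nat) (vs : List Int) : List Int :=
  match fuel with
  | 0 => []
  | d + 1 => vs.filter (fun v => v == ((d : Int) + 1)) ++ vgrps d vs

theorem map_snd_grps (fuel : Nat) (items : List (Int × Int)) :
    (grps fuel items).map Prod.snd = vgrps fuel (items.map Prod.snd) := by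
  induction fuel with
  | zero => rfl
  | succ d ih => simp [grps, vgrps, map_snd_filter, ih]

theorem vgrps_perm (fuel : Nat) (vs : List Int) (h1 : ∀ v ∈ vs, 1 ≤ v) :
    (vgrps fuel vs).Perm (vs.filter (fun v => v ≤ (fuel : Int))) := by
  induction fuel with
  | zero =>
    have hnil : vs.filter (fun v => v ≤ ((0 : Nat) : Int)) = [] := by
      apply List.filter_eq_nil_iff.mpr
      intro v hv
      have := h1 v hv
      simp only [decide_eq_true_eq, Nat.cast_zero]
      omega
    rw [hnil]
    exact List.Perm.refl _
  | succ d ih =>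
    have hsplit := List.filter_append_perm (fun v => v == ((d : Int) + 1))
      (vs.filter (fun v => v ≤ (((d + 1 : Nat)) : Int)))
    rw [List.filter_filter, List.filter_filter] at hsplit
    have e1 : vs.filter (fun a => a == ((d : Int) + 1) && decide (a ≤ (((d + 1 : Nat)) : Int)))
        = vs.filter (fun v => v == ((d : Int) + 1)) := by
      apply List.filter_congr
      intro v _
      by_cases h : v = (d : Int) + 1
      · subst h
        simp only [beq_self_eq_true, Bool.true_and]
        rw [decide_eq_true (by push_cast; omega)]
      · have hb : (v == ((d : Int) + 1)) = false := by simpa using h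
        simp [hb]
    have e2 : vs.filter (fun a => !(a == ((d : Int) + 1)) && decide (a ≤ (((d + 1 : Nat)) : Int)))
        = vs.filter (fun v => v ≤ ((d : Nat) : Int)) := by
      apply List.filter_congr
      intro v _
      by_cases h : v = (d : Int) + 1
      · subst h
        simp only [beq_self_eq_true, Bool.not_true, Bool.false_and]
        exact (decide_eq_false (by omega)).symm
      · have hb : (v == ((d : Int) + 1)) = false := by simpa using h
        rw [hb]
        simp only [Bool.not_false, Bool.true_and]
        rw [decide_eq_decide]
        push_cast
        omega
    rw [e1, e2] at hsplit
    refine List.Perm.trans ?_ hsplit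
    exact List.Perm.append_left _ ih

theorem mem_vgrps_le (fuel : Nat) (vs : List Int) (x : Int) (hx : x ∈ vgrps fuel vs) :
    x ≤ (fuel : Int) := by
  induction fuel with
  | zero => simp [vgrps] at hx
  | succ d ih =>
    simp only [vgrps, List.mem_append] at hx
    rcases hx with h | h
    · have := List.of_mem_filter h
      simp at this
      push_cast
      omega
    · have := ih h
      push_cast
      omega

theorem vgrps_sorted (fuel : Nat) (vs : List Int) :
    (vgrps fuel vs).Pairwise (fun a b => b ≤ a) := by
  induction fuel with
  | zero => simp [vgrps]
  | succ d ih =>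
    rw [vgrps, List.pairwise_append]
    refine ⟨?_, ih, ?_⟩
    · have hall : ∀ x ∈ vs.filter (fun v => v == ((d : Int) + 1)), x = (d : Int) + 1 := by
        intro x hx
        have := List.of_mem_filter hx
        simpa using this
      apply List.Pairwise.imp_of_mem (R := fun a b => a = (d : Int) + 1 ∧ b = (d : Int) + 1)
      · rintro a b _ _ ⟨ha, hb⟩
        omega
      · apply List.pairwise_of_forall_mem_list
        intro a ha b hb
        exact ⟨hall a ha, hall b hb⟩
    · intro a ha b hb
      have ha' : a = (d : Int) + 1 := by
        have := List.of_mem_filter ha; simpa using this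
      have hb' := mem_vgrps_le d vs b hb
      omega

-- descending-sorted lists that are permutations of each other coincide
theorem desc_sorted_unique (l1 l2 : List Int) (hp : l1.Perm l2)
    (h1 : l1.Pairwise (fun a b => b ≤ a)) (h2 : l2.Pairwise (fun a b => b ≤ a)) : l1 = l2 :=
  List.Perm.eq_of_pairwise (fun _ _ _ _ h h' => le_antisymm h' h) h1 h2 hp

-- counts in Counter(t).values() are the positive multiplicities of t
theorem counter_values (t : List Int) :
    (PySem.Dict.counter t).values = (PySem.Set.ofList t).map (fun x => ((List.count x t : Int))) := by
  have h := PySem.Dict.items_counter (xs := t)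
  simp only [PySem.Dict.values, h, List.map_map]
  rfl

theorem counter_values_pos (t : List Int) (v : Int) (hv : v ∈ (PySem.Dict.counter t).values) :
    1 ≤ v := by
  rw [counter_values] at hv
  simp only [List.mem_map] at hv
  obtain ⟨x, hx, rfl⟩ := hv
  have hxt : x ∈ t := (PySem.Set.mem_ofList t x).mp hx
  have := List.count_pos_iff.mpr hxt
  omega

-- ===== VERDICT (by name: the statement is the Claim_ definition above) =====
theorem solution_spec : Claim_equal_solution := by
  intro k t _ hpre
  unfold Spec_solution
  obtain ⟨hne, -⟩ := hpre
  unfold solution solution_alt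
  rw [PySem.Dict.foldl_insert_getD_add_one_eq_counter t]
  show (match PySem.List.max? (PySem.Dict.counter t).values (fun v => v) with
        | none => (0 : Int)
        | some diff => ((solutionOuter diff.toNat k (PySem.Dict.counter t).items []).length : Int))
      = solutionAltLoop k 0 0 (PySem.List.sorted (PySem.Dict.counter t).values (fun v => v) true)
  have hvne : (PySem.Dict.counter t).values ≠ [] := by
    rw [counter_values]
    simp only [ne_eq, List.map_eq_nil_iff]
    intro hnil
    obtain ⟨x, hx⟩ := List.exists_mem_of_ne_nil t hne
    have : x ∈ PySem.Set.ofList t := (PySem.Set.mem_ofList t x).mpr hx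
    simp [hnil] at this
  obtain ⟨m, hm⟩ : ∃ m, PySem.List.max? (PySem.Dict.counter t).values (fun v => v) = some m := by
    cases hmx : PySem.List.max? (PySem.Dict.counter t).values (fun v => v) with
    | none =>
      exact absurd ((PySem.List.max?_eq_none_iff (PySem.Dict.counter t).values (fun v => v)).mp hmx) hvne
    | some m => exact ⟨m, rfl⟩
  rw [hm]
  show ((solutionOuter m.toNat k (PySem.Dict.counter t).items []).length : Int)
      = solutionAltLoop k 0 0 (PySem.List.sorted (PySem.Dict.counter t).values (fun v => v) true)
  have hmax : ∀ v ∈ (PySem.Dict.counter t).values, v ≤ m := fun v hv => PySem.List.max?_isMax hm v hv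
  have hpos : ∀ v ∈ (PySem.Dict.counter t).values, 1 ≤ v := fun v hv => counter_values_pos t v hv
  have hm1 : 1 ≤ m := hpos m (PySem.List.max?_mem hm)
  have hmt : ((m.toNat : Nat) : Int) = m := Int.toNat_of_nonneg (by omega)
  -- A's side: the greedy count over the descending concatenated groups
  rw [outer_eq, runAll_len]
  have hsnd : (PySem.Dict.counter t).items.map Prod.snd = (PySem.Dict.counter t).values := rfl
  rw [map_snd_grps, hsnd]
  -- B's side
  rw [altLoop_eq]
  have hfix : (PySem.Dict.counter t).values.filter (fun v => v ≤ ((m.toNat : Nat) : Int))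
      = (PySem.Dict.counter t).values := by
    apply List.filter_eq_self.mpr
    intro v hv
    simp only [decide_eq_true_eq]
    rw [hmt]
    exact hmax v hv
  have hperm : (vgrps m.toNat (PySem.Dict.counter t).values).Perm (PySem.Dict.counter t).values := by
    have := vgrps_perm m.toNat (PySem.Dict.counter t).values hpos
    rwa [hfix] at this
  have hsortperm : (PySem.List.sorted (PySem.Dict.counter t).values (fun v => v) true).Perm
      (PySem.Dict.counter t).values :=
    PySem.List.sorted_perm (PySem.Dict.counter t).values (fun v => v) true
  have heq : vgrps m.toNat (PySem.Dict.counter t).values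
      = PySem.List.sorted (PySem.Dict.counter t).values (fun v => v) true := by
    apply desc_sorted_unique
    · exact hperm.trans hsortperm.symm
    · exact vgrps_sorted m.toNat (PySem.Dict.counter t).values
    · exact PySem.List.sorted_pairwise_rev (PySem.Dict.counter t).values (fun v => v)
  rw [heq]
  simp
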